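-- pv_equiv track=rewrite | github.com/roberta-barros/pf-techack | checks.py | _match_hostname
-- ===== SOURCE A (Python) =====
-- def _match_hostname(host: str, names):
--     host = host.lower()
--     for pattern in (n.lower() for n in names):
--         if pattern.startswith("*."):
--             suf = pattern[1:]  # ".badssl.com"
--             if host.endswith(suf) and host.count(".") >= suf.count(".")+1:
--                 return True
--         if host == pattern:
--             return True
--     return False
-- ===== SOURCE B (Python) =====
-- def _match_hostname(host: str, names):
--     # Host-driven: instead of scanning patterns, index all lowered names in a set
--     # and generate the only wildcard patterns that could match (one per dot in the
--     # host that has another dot before it), testing each by set membership.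
--     h = host.lower()
--     pats = {n.lower() for n in names}
--     if h in pats:
--         return True
--     seen_dot = False
--     for i, c in enumerate(h):
--         if c == ".":
--             if seen_dot and "*" + h[i:] in pats:
--                 return True
--             seen_dot = True
--     return False
-- ===== Notes on version B (the rewrite author's own statement) =====
-- stated objective: alternative
-- what changed: Inverts the direction of the search: instead of scanning every pattern and testing it against the host, B indexes all lowered names in a set once and walks the HOST's characters, generating at each dot (that has a prior dot) the only wildcard pattern that could match there ('*' + host[i:]) and testing it by set membership; exact match is a single set lookup.
import Mathlib
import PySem

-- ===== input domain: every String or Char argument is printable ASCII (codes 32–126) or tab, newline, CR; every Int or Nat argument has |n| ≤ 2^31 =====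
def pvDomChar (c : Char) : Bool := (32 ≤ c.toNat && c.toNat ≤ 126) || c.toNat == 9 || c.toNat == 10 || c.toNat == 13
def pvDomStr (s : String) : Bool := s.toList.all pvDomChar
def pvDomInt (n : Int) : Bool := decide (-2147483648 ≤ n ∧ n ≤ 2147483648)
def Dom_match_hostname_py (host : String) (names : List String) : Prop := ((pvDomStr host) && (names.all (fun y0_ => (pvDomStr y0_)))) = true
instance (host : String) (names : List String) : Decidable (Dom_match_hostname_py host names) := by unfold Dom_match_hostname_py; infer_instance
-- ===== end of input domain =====

-- B inverts the search direction: it indexes all lowered names in a set once, then walks the HOST's characters,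
-- generating at each dot (that has a prior dot) the only wildcard pattern that could match there and testing it
-- by set membership; exact match is one lookup. Same results as A's per-pattern scan.

-- ===== PORT A =====
-- A's loop over patterns with early return, step for step (strings as code-point lists).
def matchA_go (h : List Char) : List String → Bool
  | [] => false
  | n :: rest =>
    let pattern := PySem.Chars.lower n.toList
    if PySem.Chars.startswith pattern ['*', '.'] then
      let suf := PySem.Chars.slice pattern (some 1) none
      if PySem.Chars.endswith h suf &&
          decide (PySem.Chars.count h ['.'] ≥ PySem.Chars.count suf ['.'] + 1) then
        true
      else if h == pattern then true
      else matchA_go h rest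
    else if h == pattern then true
    else matchA_go h rest

def match_hostname_py (host : String) (names : List String) : Bool :=
  matchA_go (PySem.Chars.lower host.toList) names

-- ===== PORT B =====
-- Source B's enumerate loop: seen_dot flag; at a dot with a prior dot test '*' + h[i:] (= '*' :: current suffix).
def altGo (pats : PySem.Set (List Char)) : Bool → List Char → Bool
  | _, [] => false
  | seen, c :: rest =>
    if c == '.' then
      if seen && PySem.Set.contains pats ('*' :: c :: rest) then true
      else altGo pats true rest
    else altGo pats seen rest

def match_hostname_py_alt (host : String) (names : List String) : Bool :=
  let h := PySem.Chars.lower host.toList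
  let pats := PySem.Set.ofList (names.map (fun n => PySem.Chars.lower n.toList))
  if PySem.Set.contains pats h then true
  else altGo pats false h

-- ===== PRECONDITION & SPEC =====
def Spec_match_hostname_py (host : String) (names : List String) (out : Bool) : Prop := out = match_hostname_py_alt host names
instance (host : String) (names : List String) (out : Bool) : Decidable (Spec_match_hostname_py host names out) := by unfold Spec_match_hostname_py; infer_instance

-- ===== CLAIM (what is proved, stated in full; the proofs are below) =====
def Claim_equal_match_hostname_py : Prop := ∀ (host : String) (names : List String), Dom_match_hostname_py host names → Spec_match_hostname_py host names (match_hostname_py host names)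

-- ===== LEMMAS AND PROOFS =====

-- A's wildcard test for one (already lowered) pattern p
def wildTest (h p : List Char) : Bool :=
  PySem.Chars.startswith p ['*', '.'] &&
    (PySem.Chars.endswith h (PySem.Chars.slice p (some 1) none) &&
      decide (PySem.Chars.count h ['.'] ≥ PySem.Chars.count (PySem.Chars.slice p (some 1) none) ['.'] + 1))

lemma matchA_go_eq_any (h : List Char) (ns : List String) :
    matchA_go h ns = ns.any (fun n => wildTest h (PySem.Chars.lower n.toList) || h == PySem.Chars.lower n.toList) := by
  induction ns with
  | nil => rfl
  | cons n rest ih =>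
    rw [List.any_cons, ← ih]
    show (if PySem.Chars.startswith (PySem.Chars.lower n.toList) ['*', '.'] = true then
            if (PySem.Chars.endswith h (PySem.Chars.slice (PySem.Chars.lower n.toList) (some 1) none) &&
                decide (PySem.Chars.count h ['.'] ≥ PySem.Chars.count (PySem.Chars.slice (PySem.Chars.lower n.toList) (some 1) none) ['.'] + 1)) = true then
              true
            else if h == PySem.Chars.lower n.toList then true else matchA_go h rest
          else if h == PySem.Chars.lower n.toList then true else matchA_go h rest)
        = ((wildTest h (PySem.Chars.lower n.toList) || h == PySem.Chars.lower n.toList) || matchA_go h rest)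
    unfold wildTest
    cases hs : PySem.Chars.startswith (PySem.Chars.lower n.toList) ['*', '.'] <;>
    cases hw : (PySem.Chars.endswith h (PySem.Chars.slice (PySem.Chars.lower n.toList) (some 1) none) &&
        decide (PySem.Chars.count h ['.'] ≥ PySem.Chars.count (PySem.Chars.slice (PySem.Chars.lower n.toList) (some 1) none) ['.'] + 1)) <;>
    cases hc : (h == PySem.Chars.lower n.toList) <;> simp

-- Chars.count with a single-character needle is List.count
lemma count_go_singleton (c : Char) : ∀ (fuel : Nat) (l : List Char) (acc : Nat),
    l.length ≤ fuel → PySem.Chars.count.go [c] fuel l acc = acc + l.count c := by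
  intro fuel
  induction fuel with
  | zero =>
    intro l acc hl
    have : l = [] := List.length_eq_zero_iff.mp (Nat.le_zero.mp hl)
    subst this; rfl
  | succ f ih =>
    intro l acc hl
    cases l with
    | nil => rfl
    | cons a t =>
      show (if [c].isPrefixOf (a :: t) = true then
              PySem.Chars.count.go [c] f (List.drop [c].length (a :: t)) (acc + 1)
            else PySem.Chars.count.go [c] f t acc) = acc + (a :: t).count c
      have ht : t.length ≤ f := by simpa using hl
      by_cases hac : a = c
      · subst hac
        have hp : [a].isPrefixOf (a :: t) = true := by simp [List.isPrefixOf]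
        rw [if_pos hp]
        simp only [List.length_singleton, List.drop_one, List.tail_cons]
        rw [ih t (acc + 1) ht, List.count_cons_self]
        omega
      · rw [if_neg (by simp [List.isPrefixOf]; exact fun h => hac h.symm),
              ih t acc ht, List.count_cons]
        simp [hac]

lemma count_singleton (l : List Char) (c : Char) :
    PySem.Chars.count l [c] = l.count c := by
  show (if ([c] : List Char).isEmpty = true then l.length + 1
        else PySem.Chars.count.go [c] l.length l 0) = l.count c
  rw [if_neg (by simp)]
  simpa using count_go_singleton c l.length l 0 le_rfl

-- characterisation of A's wildcard test: p matches h iff p = '*' :: (suffix of h from a dot that has a prior dot)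
lemma wildTest_iff (h p : List Char) :
    wildTest h p = true ↔
      ∃ k, ∃ (hk : k < h.length), h[k] = '.' ∧ '.' ∈ h.take k ∧ p = '*' :: h.drop k := by
  unfold wildTest
  rw [Bool.and_eq_true, Bool.and_eq_true, PySem.Chars.startswith_iff, PySem.Chars.endswith_iff,
      decide_eq_true_eq]
  constructor
  · rintro ⟨hpre, hsuf, hcnt⟩
    obtain ⟨t, ht⟩ := hpre
    subst ht
    simp only [PySem.Chars.slice_eq_listSlice] at hsuf hcnt
    rw [PySem.List.slice_from _ (by norm_num : (0:Int) ≤ 1)] at hsuf hcnt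
    simp only [Int.toNat_one, List.cons_append, List.drop_succ_cons, List.drop_zero] at hsuf hcnt
    obtain ⟨pre, hpre⟩ := hsuf
    subst hpre
    refine ⟨pre.length, by simp, ?_, ?_, ?_⟩
    · rw [List.getElem_append_right (le_refl pre.length)]; simp
    · rw [List.take_left' rfl]
      rw [count_singleton, count_singleton, List.count_append] at hcnt
      simp only [List.count_cons_self] at hcnt
      exact List.count_pos_iff.mp (by omega)
    · rw [List.drop_left' rfl]; rfl
  · rintro ⟨k, hk, hdot, hmem, hp⟩
    subst hp
    have hdrop : h.drop k = '.' :: h.drop (k + 1) := by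
      rw [List.drop_eq_getElem_cons hk, hdot]
    refine ⟨⟨h.drop (k + 1), by rw [hdrop]; rfl⟩, ?_, ?_⟩
    · simp only [PySem.Chars.slice_eq_listSlice]
      rw [PySem.List.slice_from _ (by norm_num : (0:Int) ≤ 1)]
      simp only [Int.toNat_one, List.drop_succ_cons, List.drop_zero]
      exact ⟨h.take k, List.take_append_drop k h⟩
    · simp only [PySem.Chars.slice_eq_listSlice]
      rw [PySem.List.slice_from _ (by norm_num : (0:Int) ≤ 1)]
      simp only [Int.toNat_one, List.drop_succ_cons, List.drop_zero]
      rw [count_singleton, count_singleton]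
      have hsplit : h = h.take k ++ h.drop k := (List.take_append_drop k h).symm
      have : h.count '.' = (h.take k).count '.' + (h.drop k).count '.' := by
        conv_lhs => rw [hsplit]
        exact List.count_append
      have hpos : 0 < (h.take k).count '.' := List.count_pos_iff.mpr hmem
      omega

-- characterisation of B's loop
lemma altGo_iff (pats : PySem.Set (List Char)) :
    ∀ (l : List Char) (seen : Bool),
      altGo pats seen l = true ↔
        ∃ k, ∃ (hk : k < l.length), l[k] = '.' ∧ (seen = true ∨ '.' ∈ l.take k) ∧
          PySem.Set.contains pats ('*' :: l.drop k) = true := by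
  intro l
  induction l with
  | nil => intro seen; simp [altGo]
  | cons c rest ih =>
    intro seen
    show (if c == '.' then
            if seen && PySem.Set.contains pats ('*' :: c :: rest) then true
            else altGo pats true rest
          else altGo pats seen rest) = true ↔ _
    by_cases hc : c = '.'
    · subst hc
      rw [if_pos (by simp)]
      by_cases hs : (seen && PySem.Set.contains pats ('*' :: '.' :: rest)) = true
      · rw [if_pos hs, Bool.and_eq_true] at *
        simp only [true_iff]
        exact ⟨0, by simp, by simp, Or.inl hs.1, by simpa using hs.2⟩
      · rw [if_neg hs, ih true]
        constructor
        · rintro ⟨k, hk, hdot, _, hmem⟩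
          exact ⟨k + 1, by simpa using hk, by simpa using hdot,
            Or.inr (by simp [List.take_succ_cons]), by simpa using hmem⟩
        · rintro ⟨k, hk, hdot, hseen, hmem⟩
          cases k with
          | zero =>
            exfalso
            have : seen = true ∧ PySem.Set.contains pats ('*' :: '.' :: rest) = true := by
              rcases hseen with h1 | h1
              · exact ⟨h1, by simpa using hmem⟩
              · simp at h1
            exact hs (by rw [this.1, this.2]; rfl)
          | succ k =>
            exact ⟨k, by simpa using hk, by simpa using hdot, Or.inl rfl, by simpa using hmem⟩
    · rw [if_neg (by simp [hc]), ih seen]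
      constructor
      · rintro ⟨k, hk, hdot, hseen, hmem⟩
        refine ⟨k + 1, by simpa using hk, by simpa using hdot, ?_, by simpa using hmem⟩
        rcases hseen with h1 | h1
        · exact Or.inl h1
        · exact Or.inr (by simp [List.take_succ_cons, h1])
      · rintro ⟨k, hk, hdot, hseen, hmem⟩
        cases k with
        | zero => exact absurd (by simpa using hdot) hc
        | succ k =>
          refine ⟨k, by simpa using hk, by simpa using hdot, ?_, by simpa using hmem⟩
          rcases hseen with h1 | h1
          · exact Or.inl h1
          · rw [List.take_succ_cons, List.mem_cons] at h1
            rcases h1 with h1 | h1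
            · exact absurd h1.symm hc
            · exact Or.inr h1

lemma set_contains_ofList {α : Type} [BEq α] [LawfulBEq α] (xs : List α) (y : α) :
    PySem.Set.contains (PySem.Set.ofList xs) y = true ↔ y ∈ xs := by
  rw [PySem.Set.contains_iff, PySem.Set.mem_ofList]

-- ===== VERDICT (by name: the statement is the Claim_ definition above) =====
theorem match_hostname_py_spec : Claim_equal_match_hostname_py := by
  intro host names _
  unfold Spec_match_hostname_py match_hostname_py match_hostname_py_alt
  rw [Bool.eq_iff_iff]
  set h := PySem.Chars.lower host.toList with hh
  set L := names.map (fun n => PySem.Chars.lower n.toList) with hL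
  rw [matchA_go_eq_any]
  constructor
  · intro hA
    rw [List.any_eq_true] at hA
    obtain ⟨n, hn, hcond⟩ := hA
    rw [Bool.or_eq_true] at hcond
    have hmemL : PySem.Chars.lower n.toList ∈ L := List.mem_map_of_mem hn
    rcases hcond with hw | he
    · by_cases hex : PySem.Set.contains (PySem.Set.ofList L) h = true
      · rw [if_pos hex]
      · rw [if_neg hex]
        rw [wildTest_iff] at hw
        obtain ⟨k, hk, hdot, hpre, hp⟩ := hw
        rw [altGo_iff]
        exact ⟨k, hk, hdot, Or.inr hpre,
          (set_contains_ofList L _).mpr (hp ▸ hmemL)⟩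
    · have : h = PySem.Chars.lower n.toList := by simpa using he
      rw [if_pos ((set_contains_ofList L h).mpr (this ▸ hmemL))]
  · intro hB
    by_cases hex : PySem.Set.contains (PySem.Set.ofList L) h = true
    · rw [List.any_eq_true]
      have := (set_contains_ofList L h).mp hex
      rw [hL, List.mem_map] at this
      obtain ⟨n, hn, hlow⟩ := this
      exact ⟨n, hn, by simp [hlow]⟩
    · rw [if_neg hex] at hB
      rw [altGo_iff] at hB
      obtain ⟨k, hk, hdot, hseen, hmem⟩ := hB
      have hpre : '.' ∈ h.take k := by
        rcases hseen with h1 | h1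
        · simp at h1
        · exact h1
      have hmemL := (set_contains_ofList L _).mp hmem
      rw [hL, List.mem_map] at hmemL
      obtain ⟨n, hn, hlow⟩ := hmemL
      rw [List.any_eq_true]
      refine ⟨n, hn, ?_⟩
      rw [Bool.or_eq_true]
      left
      rw [wildTest_iff]
      exact ⟨k, hk, hdot, hpre, hlow⟩
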